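-- pv_equiv track=rewrite | github.com/thomas6m/NotifyBot | multi-mode-notifybot-singature.py | extract_field_values_from_filter
-- ===== SOURCE A (Python) =====
-- from typing import List, Tuple, Dict, Set
--
-- def extract_field_values_from_filter(filter_line: str, field_names: List[str]) -> Dict[str, str]:
--     """
--     Extract field values from a filter line for template substitution.
--
--     Args:
--         filter_line: Single filter line like "department=sales,region=north"
--         field_names: List of field names to extract
--
--     Returns:
--         Dictionary of field_name -> value mappings
--     """
--     field_values = {}
--
--     # Initialize all fields to empty
--     for field in field_names:
--         field_values[field] = ""
--
--     # Parse filter conditions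
--     and_conditions = [condition.strip() for condition in filter_line.split(',')]
--
--     for condition in and_conditions:
--         if '=' in condition:
--             key, value = condition.split('=', 1)
--             key, value = key.strip(), value.strip()
--
--             # If this key is in our field names, store its value
--             if key in field_names:
--                 field_values[key] = value
--
--     return field_values
-- ===== SOURCE B (Python) =====
-- def extract_field_values_from_filter(filter_line, field_names):
--     # For each requested field, scan the conditions right-to-left and return
--     # the value of the last '=' condition whose stripped key equals the field.
--     conditions = filter_line.split(',')
--
--     def value_of(field):
--         for raw in reversed(conditions):
--             cond = raw.strip()
--             if '=' in cond:
--                 key, value = cond.split('=', 1)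
--                 if key.strip() == field:
--                     return value.strip()
--         return ""
--
--     return {field: value_of(field) for field in field_names}
-- ===== Notes on version B (the rewrite author's own statement) =====
-- stated objective: alternative
-- what changed: B drops the dictionary accumulation entirely: instead of A's init-to-empty loop plus a forward pass that updates a dict under a membership guard, B answers each requested field independently by scanning the split conditions right-to-left for the last matching key (a per-field backward search), assembling the result with a dict comprehension over field_names.
import Mathlib
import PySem

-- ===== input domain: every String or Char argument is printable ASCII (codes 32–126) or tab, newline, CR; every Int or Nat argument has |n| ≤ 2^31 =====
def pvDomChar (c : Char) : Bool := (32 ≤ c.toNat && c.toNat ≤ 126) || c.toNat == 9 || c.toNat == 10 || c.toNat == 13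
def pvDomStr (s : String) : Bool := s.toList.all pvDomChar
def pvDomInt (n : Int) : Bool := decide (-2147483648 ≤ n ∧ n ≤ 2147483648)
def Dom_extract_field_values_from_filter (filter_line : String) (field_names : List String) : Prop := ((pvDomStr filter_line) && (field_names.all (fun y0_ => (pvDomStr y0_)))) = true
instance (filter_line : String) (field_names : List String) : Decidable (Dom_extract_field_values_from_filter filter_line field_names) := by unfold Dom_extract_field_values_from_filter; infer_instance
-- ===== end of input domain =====

-- B drops the dict accumulation: for each requested field it scans the split conditions right-to-left
-- for the last matching key (per-field backward search), instead of A's init-to-empty loop plus a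
-- forward dict-updating pass with a membership guard (alternative decomposition; return value equal).


-- ===== PORT A =====
def extract_field_values_from_filter (filter_line : String) (field_names : List String) : List (String × String) :=
  -- field_values = {}; for field in field_names: field_values[field] = ""
  let field_values : PySem.Dict String String :=
    field_names.foldl (fun d field => d.insert field "") PySem.Dict.empty
  -- and_conditions = [condition.strip() for condition in filter_line.split(',')]
  let and_conditions := (((PySem.Str.split? filter_line ",").getD [])).map (fun condition => PySem.Str.strip condition)
  let field_values :=
    and_conditions.foldl (fun d condition =>
      if PySem.Str.isIn "=" condition then
        match PySem.Str.splitMax? condition "=" 1 with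
        | some (key :: value :: _) =>
          let key := PySem.Str.strip key
          let value := PySem.Str.strip value
          if field_names.contains key then d.insert key value else d
        | _ => d
      else d) field_values
  field_values.items

-- ===== PORT B =====
-- B-side helper: value_of(field) — walk the reversed conditions, return the first match, else ""
def pvValueOf (field : String) : List String → String
| [] => ""
| raw :: t =>
  let cond := PySem.Str.strip raw
  if PySem.Str.isIn "=" cond then
    match (PySem.Str.splitMax? cond "=" 1).getD [] with
    | key :: value :: _ =>
        if PySem.Str.strip key == field then PySem.Str.strip value else pvValueOf field t
    | [_] => pvValueOf field t
    | [] => pvValueOf field t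
  else pvValueOf field t

def extract_field_values_from_filter_alt (filter_line : String) (field_names : List String) : List (String × String) :=
  -- conditions = filter_line.split(',')
  let conditions := (PySem.Str.split? filter_line ",").getD []
  -- {field: value_of(field) for field in field_names}
  (field_names.foldl (fun d field => d.insert field (pvValueOf field conditions.reverse)) PySem.Dict.empty).items

-- ===== PRECONDITION & SPEC =====
def Spec_extract_field_values_from_filter (filter_line : String) (field_names : List String) (out : List (String × String)) : Prop := out = extract_field_values_from_filter_alt filter_line field_names
instance (filter_line : String) (field_names : List String) (out : List (String × String)) : Decidable (Spec_extract_field_values_from_filter filter_line field_names out) := by unfold Spec_extract_field_values_from_filter; infer_instance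

-- ===== CLAIM (what is proved, stated in full; the proofs are below) =====
def Claim_equal_extract_field_values_from_filter : Prop := ∀ (filter_line : String) (field_names : List String), Dom_extract_field_values_from_filter filter_line field_names → Spec_extract_field_values_from_filter filter_line field_names (extract_field_values_from_filter filter_line field_names)

-- ===== LEMMAS AND PROOFS =====

-- the per-condition step of A's update loop, on an already-stripped condition
def pvStepA (fns : List String) (d : PySem.Dict String String) (s : String) : PySem.Dict String String :=
  if PySem.Str.isIn "=" s then
    match PySem.Str.splitMax? s "=" 1 with
    | some (key :: value :: _) =>
      if fns.contains (PySem.Str.strip key) then d.insert (PySem.Str.strip key) (PySem.Str.strip value) else d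
    | _ => d
  else d

lemma pvStepA_keys (fns : List String) (d : PySem.Dict String String) (s : String)
    (h : ∀ k ∈ fns, d.contains k = true) : (pvStepA fns d s).keys = d.keys := by
  unfold pvStepA
  split
  · split
    · next key value rest _ =>
      split
      · next hc =>
        exact PySem.Dict.keys_insert_of_contains _ _ (h _ (by simpa using hc))
      · rfl
    · rfl
  · rfl

lemma pvLoopA_keys (conds : List String) (fns : List String) (d : PySem.Dict String String)
    (h : ∀ k ∈ fns, d.contains k = true) :
    (conds.foldl (fun d c => pvStepA fns d (PySem.Str.strip c)) d).keys = d.keys := by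
  induction conds generalizing d with
  | nil => rfl
  | cons c t ih =>
    have hk := pvStepA_keys fns d (PySem.Str.strip c) h
    have h' : ∀ k ∈ fns, (pvStepA fns d (PySem.Str.strip c)).contains k = true := by
      intro k hkfns
      have := h k hkfns
      rw [PySem.Dict.contains_iff_mem_keys] at this ⊢
      rw [hk]; exact this
    simpa [hk] using ih _ h'

-- A's forward last-wins loop = B's backward first-match search, on every requested field
lemma pvLoopA_getD (fns : List String) (x : String) (hx : x ∈ fns)
    (conds : List String) (d : PySem.Dict String String) (hd : d.getD x "" = "") :
    (conds.foldl (fun d c => pvStepA fns d (PySem.Str.strip c)) d).getD x "" =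
      pvValueOf x conds.reverse := by
  induction conds using List.reverseRecOn with
  | nil => simpa [pvValueOf] using hd
  | append_singleton l c ih =>
    rw [List.foldl_append, List.reverse_append]
    simp only [List.foldl_cons, List.foldl_nil, List.reverse_singleton, List.singleton_append]
    show (pvStepA fns (l.foldl (fun d c => pvStepA fns d (PySem.Str.strip c)) d) (PySem.Str.strip c)).getD x ""
        = pvValueOf x (c :: l.reverse)
    unfold pvStepA pvValueOf
    by_cases hin : PySem.Str.isIn "=" (PySem.Str.strip c) = true
    · cases hs : PySem.Str.splitMax? (PySem.Str.strip c) "=" 1 with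
      | none => simp only [hin, if_true, hs, Option.getD_none]; exact ih
      | some parts =>
        cases parts with
        | nil => simp only [hin, if_true, hs, Option.getD_some]; exact ih
        | cons key rest =>
          cases rest with
          | nil => simp only [hin, if_true, hs, Option.getD_some]; exact ih
          | cons value rest2 =>
            simp only [hin, if_true, hs, Option.getD_some]
            by_cases hkx : PySem.Str.strip key = x
            · subst hkx
              have hc : fns.contains (PySem.Str.strip key) = true := by simpa using hx
              rw [if_pos hc, PySem.Dict.getD_insert]
              simp
            · have hbeq : (PySem.Str.strip key == x) = false := by
                simpa using hkx
              simp only [hbeq, Bool.false_eq_true, if_false]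
              by_cases hc : fns.contains (PySem.Str.strip key) = true
              · simp only [hc, if_true]
                rw [PySem.Dict.getD_insert]
                simp only [Ne.symm hkx, if_false]
                exact ih
              · simp only [hc, Bool.false_eq_true, if_false]
                exact ih
    · simp only [Bool.not_eq_true] at hin
      simp only [hin, Bool.false_eq_true, if_false]
      exact ih

-- getD after a loop inserting g f at every f of l
lemma pvGetD_proj (l : List String) (d : PySem.Dict String String) (g : String → String) (x : String) :
    (l.foldl (fun d f => d.insert f (g f)) d).getD x "" = if x ∈ l then g x else d.getD x "" := by
  induction l generalizing d with
  | nil => simp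
  | cons f t ih =>
    simp only [List.foldl_cons, ih, PySem.Dict.getD_insert, List.mem_cons]
    by_cases hxt : x ∈ t <;> by_cases hxf : x = f <;> simp [hxt, hxf]

-- ===== VERDICT (by name: the statement is the Claim_ definition above) =====
theorem extract_field_values_from_filter_spec : Claim_equal_extract_field_values_from_filter := by
  intro filter_line field_names _
  show extract_field_values_from_filter filter_line field_names = extract_field_values_from_filter_alt filter_line field_names
  show ((((PySem.Str.split? filter_line ",").getD []).map (fun condition => PySem.Str.strip condition)).foldl
          (fun d c => pvStepA field_names d c)
          (field_names.foldl (fun d field => d.insert field "") PySem.Dict.empty)).items =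
       (field_names.foldl (fun d field =>
          d.insert field (pvValueOf field (((PySem.Str.split? filter_line ",").getD []).reverse)))
          PySem.Dict.empty).items
  rw [List.foldl_map]
  set conds := ((PySem.Str.split? filter_line ",").getD []) with hconds
  set fns := field_names with hfns
  set d0 := fns.foldl (fun d field => d.insert field "") (PySem.Dict.empty : PySem.Dict String String) with hd0
  set dB := fns.foldl (fun d field => d.insert field (pvValueOf field conds.reverse)) (PySem.Dict.empty : PySem.Dict String String) with hdB
  set dA := conds.foldl (fun d c => pvStepA fns d (PySem.Str.strip c)) d0 with hdA
  have hkeys0 : d0.keys = PySem.Set.ofList fns := by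
    rw [hd0, PySem.Dict.keys_foldl_insert (f := fun _ _ => "")]
    simp [PySem.Set.ofList_eq_foldl, PySem.Set.update]
  have hkeysB : dB.keys = PySem.Set.ofList fns := by
    rw [hdB, PySem.Dict.keys_foldl_insert (f := fun _ field => pvValueOf field conds.reverse)]
    simp [PySem.Set.ofList_eq_foldl, PySem.Set.update]
  have hcont0 : ∀ k ∈ fns, d0.contains k = true := by
    intro k hk
    rw [PySem.Dict.contains_iff_mem_keys, hkeys0]
    exact (PySem.Set.mem_ofList _ _).mpr hk
  have hkeysA : dA.keys = PySem.Set.ofList fns := by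
    rw [hdA, pvLoopA_keys conds fns d0 hcont0, hkeys0]
  have hgd0 : ∀ x ∈ fns, d0.getD x "" = "" := by
    intro x _
    rw [hd0, pvGetD_proj fns PySem.Dict.empty (fun _ => "") x]
    simp
  have hgA : ∀ x ∈ fns, dA.getD x "" = pvValueOf x conds.reverse := by
    intro x hx
    rw [hdA]
    exact pvLoopA_getD fns x hx conds d0 (hgd0 x hx)
  have hgB : ∀ x ∈ fns, dB.getD x "" = pvValueOf x conds.reverse := by
    intro x hx
    rw [hdB, pvGetD_proj fns PySem.Dict.empty (fun field => pvValueOf field conds.reverse) x]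
    simp [hx]
  have hnodup : (PySem.Set.ofList fns).Nodup := PySem.Set.nodup_ofList fns
  rw [PySem.Dict.items_eq_map_keys dA (by rw [hkeysA]; exact hnodup) "",
      PySem.Dict.items_eq_map_keys dB (by rw [hkeysB]; exact hnodup) "",
      hkeysA, hkeysB]
  apply List.map_congr_left
  intro k hk
  have hkf : k ∈ fns := (PySem.Set.mem_ofList _ _).mp hk
  rw [hgA k hkf, hgB k hkf]
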